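-- pv_equiv track=rewrite | github.com/Adarshb2000/coding | CF_753D.py | cf_753D
-- ===== SOURCE A (Python) =====
-- def cf_753D(numbers: list, colors: list):
--     blues = []
--     reds = []
--     for num, color in zip(numbers, colors):
--         if color == 'B':
--             blues.append(num)
--         else:
--             reds.append(num)
--
--     blues.sort(reverse=True)
--     reds.sort(reverse=True)
--     temp = len(blues)
--     for i in range(1, len(blues) + 1):
--         num = blues.pop()
--         if num < i:
--             return False
--
--     for i in range(temp + 1, len(numbers) + 1):
--         num = reds.pop()
--         if num > i:
--             return False
--
--     return True
-- ===== SOURCE B (Python) =====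
-- def _fits(vals):
--     # kth-smallest >= k check by bucket counting, no sort
--     m = len(vals)
--     cnt = [0] * (m + 1)
--     for v in vals:
--         if v <= 0:
--             return False
--         if v <= m:
--             cnt[v] += 1
--     pref = 0
--     for t in range(1, m + 1):
--         pref += cnt[t]
--         if pref > t:
--             return False
--     return True
--
--
-- def cf_753D(numbers: list, colors: list):
--     n = len(numbers)
--     blues = [v for v, c in zip(numbers, colors) if c == 'B']
--     reds = [n + 1 - v for v, c in zip(numbers, colors) if c != 'B']
--     return _fits(blues) and _fits(reds)
-- ===== Notes on version B (the rewrite author's own statement) =====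
-- stated objective: alternative
-- what changed: Replaces the two sort-descending-and-pop scans by linear bucket counting: each colour group is verified via a count array and one prefix-sum sweep (kth-smallest >= k), with the red constraint mirrored through the transform v -> n+1-v.
-- outside the precondition, e.g. on cf_753D([5, 5, 5, -2, 2, -2, 2], ['b', 'b', 'b', 'b', 'b']): A returns False, B returns True; on cf_753D([0, 1], ['B']): A returns False, B returns False
import Mathlib
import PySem

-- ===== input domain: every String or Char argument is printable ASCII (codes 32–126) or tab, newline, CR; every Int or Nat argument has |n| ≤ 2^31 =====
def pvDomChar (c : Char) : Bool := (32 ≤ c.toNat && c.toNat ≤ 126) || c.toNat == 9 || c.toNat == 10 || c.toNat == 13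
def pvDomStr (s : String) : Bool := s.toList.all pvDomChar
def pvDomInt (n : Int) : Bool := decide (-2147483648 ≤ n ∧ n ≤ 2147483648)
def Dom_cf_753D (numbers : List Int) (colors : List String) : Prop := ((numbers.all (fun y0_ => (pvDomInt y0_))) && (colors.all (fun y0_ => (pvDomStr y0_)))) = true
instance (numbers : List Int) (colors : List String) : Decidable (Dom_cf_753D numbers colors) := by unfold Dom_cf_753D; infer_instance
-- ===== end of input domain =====

-- B replaces A's two sorts + pop loops by linear bucket counting (kth-smallest ≥ k via
-- prefix sums), with the reds constraint mirrored by the transform v ↦ n+1-v.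

-- ===== PORT A =====
-- the append loop filling blues/reds from zip(numbers, colors)
def pvPartLoop : List (Int × String) → List Int → List Int → List Int × List Int
  | [], bl, rd => (bl, rd)
  | (num, color) :: rest, bl, rd =>
      if color == "B" then pvPartLoop rest (bl ++ [num]) rd
      else pvPartLoop rest bl (rd ++ [num])

-- 'for i in range(…): num = blues.pop(); if num < i: return False'; the `none` branch is
-- Python's IndexError on pop from an empty list (unreachable under Pre_cf_753D)
def pvBluesLoop : List Int → Int → Nat → Bool
  | _, _, 0 => true
  | bs, i, Nat.succ k =>
      match PySem.List.pop? bs with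
      | none => true
      | some (num, bs') => if num < i then false else pvBluesLoop bs' (i+1) k

def pvRedsLoop : List Int → Int → Nat → Bool
  | _, _, 0 => true
  | rs, i, Nat.succ k =>
      match PySem.List.pop? rs with
      | none => true
      | some (num, rs') => if num > i then false else pvRedsLoop rs' (i+1) k

def cf_753D (numbers : List Int) (colors : List String) : Bool :=
  let p := pvPartLoop (numbers.zip colors) [] []
  let blues := p.1
  let reds := p.2
  let bs := PySem.List.sorted blues (fun x => x) true
  let rs := PySem.List.sorted reds (fun x => x) true
  let temp := blues.length
  if pvBluesLoop bs 1 bs.length then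
    pvRedsLoop rs ((temp : Int) + 1) (numbers.length - temp)
  else false

-- ===== PORT B =====
-- first loop of _fits: bucket each value, fail on v <= 0 (none = early False)
def pvFitsCount (m : Nat) : List Int → List Int → Option (List Int)
  | [], cnt => some cnt
  | v :: vs, cnt =>
      if v ≤ 0 then none
      else if v ≤ (m : Int) then pvFitsCount m vs (cnt.set v.toNat (cnt.getD v.toNat 0 + 1))
      else pvFitsCount m vs cnt

-- second loop of _fits: running prefix sum over t = 1..m
def pvFitsSweep (cnt : List Int) : List Nat → Int → Bool
  | [], _ => true
  | t :: ts, pref =>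
      let pref' := pref + cnt.getD t 0
      if pref' > (t : Int) then false else pvFitsSweep cnt ts pref'

def pvFits (vals : List Int) : Bool :=
  let m := vals.length
  match pvFitsCount m vals (List.replicate (m+1) 0) with
  | none => false
  | some cnt => pvFitsSweep cnt (List.range' 1 m) 0

def cf_753D_alt (numbers : List Int) (colors : List String) : Bool :=
  let n := numbers.length
  let pairs := numbers.zip colors
  let blues := (pairs.filter (fun p => p.2 == "B")).map (fun p => p.1)
  let reds := (pairs.filter (fun p => !(p.2 == "B"))).map (fun p => (n : Int) + 1 - p.1)
  pvFits blues && pvFits reds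

-- ===== PRECONDITION & SPEC =====
-- Pre_ excludes inputs with fewer colors than numbers: there zip drops the surplus numbers
-- yet A's red loop still iterates once per number, so it pops from an exhausted list
-- (IndexError) unless an earlier check already returned False.
def Pre_cf_753D (numbers : List Int) (colors : List String) : Prop :=
  numbers.length ≤ colors.length
instance (numbers : List Int) (colors : List String) : Decidable (Pre_cf_753D numbers colors) := by unfold Pre_cf_753D; infer_instance

def pvWitness_cf_753D : List Int × List String := ([2, 1, 3], ["B", "R", "B"])

def Spec_cf_753D (numbers : List Int) (colors : List String) (out : Bool) : Prop := out = cf_753D_alt numbers colors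
instance (numbers : List Int) (colors : List String) (out : Bool) : Decidable (Spec_cf_753D numbers colors out) := by unfold Spec_cf_753D; infer_instance

-- ===== CLAIM (what is proved, stated in full; the proofs are below) =====
def Claim_equal_cf_753D : Prop := ∀ (numbers : List Int) (colors : List String), Dom_cf_753D numbers colors → Pre_cf_753D numbers colors → Spec_cf_753D numbers colors (cf_753D numbers colors)

-- ===== LEMMAS AND PROOFS =====

-- prefix sum of buckets 1..t
def pvPsum (cnt : List Int) : Nat → Int
  | 0 => 0
  | t + 1 => pvPsum cnt t + cnt.getD (t + 1) 0

theorem pvPsum_replicate (m t : Nat) : pvPsum (List.replicate m 0) t = 0 := by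
  induction t with
  | zero => rfl
  | succ t ih => simp [pvPsum, ih, List.getD_eq_getElem?_getD, List.getElem?_replicate]
                 split <;> rfl

theorem pvGetD_set (cnt : List Int) (k u : Nat) (hk : k < cnt.length) :
    (cnt.set k (cnt.getD k 0 + 1)).getD u 0 =
      cnt.getD u 0 + (if k = u then 1 else 0) := by
  simp only [List.getD_eq_getElem?_getD, List.getElem?_set]
  split
  · next h => subst h; simp [hk]
  · simp

theorem pvPsum_set (cnt : List Int) (k : Nat) (hk1 : 1 ≤ k) (hk : k < cnt.length) (t : Nat) :
    pvPsum (cnt.set k (cnt.getD k 0 + 1)) t = pvPsum cnt t + (if k ≤ t then 1 else 0) := by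
  induction t with
  | zero => simp [pvPsum]; omega
  | succ t ih =>
      simp only [pvPsum, ih, pvGetD_set cnt k (t + 1) hk]
      by_cases h1 : k ≤ t <;> by_cases h2 : k = t + 1 <;> simp [h1, h2] <;> omega

theorem pvFitsCount_some_iff (m : Nat) (vs cnt : List Int) :
    (pvFitsCount m vs cnt).isSome = true ↔ ∀ v ∈ vs, 1 ≤ v := by
  induction vs generalizing cnt with
  | nil => simp [pvFitsCount]
  | cons v vs ih =>
      simp only [pvFitsCount]
      by_cases h0 : v ≤ 0
      · simp only [if_pos h0, Option.isSome_none]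
        constructor
        · intro h; cases h
        · intro h; exact absurd (h v (by simp)) (by omega)
      · rw [if_neg h0]
        have hv : 1 ≤ v := by omega
        by_cases hm : v ≤ (m : Int)
        · rw [if_pos hm, ih]
          simp [hv]
        · rw [if_neg hm, ih]
          simp [hv]

theorem pvFitsCount_psum (m : Nat) (vs : List Int) : ∀ (cnt cnt' : List Int), cnt.length = m + 1 →
    pvFitsCount m vs cnt = some cnt' → ∀ (t : Nat), t ≤ m →
    pvPsum cnt' t = pvPsum cnt t + (vs.countP (fun v => decide (v ≤ (t : Int))) : Int) := by
  induction vs with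
  | nil =>
      intro cnt cnt' hlen h t ht
      simp only [pvFitsCount, Option.some.injEq] at h
      subst h; simp
  | cons v vs ih =>
      intro cnt cnt' hlen h t ht
      simp only [pvFitsCount] at h
      by_cases h0 : v ≤ 0
      · rw [if_pos h0] at h; cases h
      · rw [if_neg h0] at h
        rw [List.countP_cons]
        by_cases hm : v ≤ (m : Int)
        · rw [if_pos hm] at h
          have hk1 : 1 ≤ v.toNat := by omega
          have hklt : v.toNat < cnt.length := by
            rw [hlen]; omega
          have := ih (cnt.set v.toNat (cnt.getD v.toNat 0 + 1)) cnt'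
            (by simpa using hlen) h t ht
          rw [this, pvPsum_set cnt v.toNat hk1 hklt t]
          have hiff : v.toNat ≤ t ↔ v ≤ (t : Int) := by omega
          by_cases hvt : v ≤ (t : Int)
          · rw [if_pos (hiff.mpr hvt)]
            simp [hvt]; ring
          · rw [if_neg (fun hh => hvt (hiff.mp hh))]
            simp [hvt]
        · rw [if_neg hm] at h
          have hvt : ¬ (v ≤ (t : Int)) := by omega
          rw [ih cnt cnt' hlen h t ht]
          simp [hvt]

theorem pvFitsSweep_iff (cnt : List Int) (k : Nat) : ∀ (s : Nat), 1 ≤ s →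
    (pvFitsSweep cnt (List.range' s k) (pvPsum cnt (s - 1)) = true ↔
      ∀ t, s ≤ t → t < s + k → pvPsum cnt t ≤ (t : Int)) := by
  induction k with
  | zero =>
      intro s hs
      simp only [List.range', pvFitsSweep]
      constructor
      · intro _ t ht1 ht2; omega
      · intro _; trivial
  | succ k ih =>
      intro s hs
      have hps : pvPsum cnt (s - 1) + cnt.getD s 0 = pvPsum cnt s := by
        have h1 : s = (s - 1) + 1 := by omega
        conv_rhs => rw [h1]
        simp [pvPsum]; rw [← h1]
      rw [List.range'_succ]
      simp only [pvFitsSweep, hps]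
      by_cases hgt : pvPsum cnt s > (s : Int)
      · rw [if_pos hgt]
        constructor
        · intro h; cases h
        · intro h
          exact absurd (h s (le_refl s) (by omega)) (by omega)
      · rw [if_neg hgt]
        have hs1 : pvPsum cnt s = pvPsum cnt ((s + 1) - 1) := by norm_num
        rw [hs1, ih (s + 1) (by omega)]
        constructor
        · intro h t ht1 ht2
          rcases Nat.eq_or_lt_of_le ht1 with h1 | h1
          · subst h1; omega
          · exact h t h1 (by omega)
        · intro h t ht1 ht2
          exact h t (by omega) (by omega)

theorem pvFits_iff (vals : List Int) :
    pvFits vals = true ↔ ((∀ v ∈ vals, 1 ≤ v) ∧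
      ∀ t : Nat, 1 ≤ t → t ≤ vals.length → (vals.countP (fun v => decide (v ≤ (t : Int))) : Int) ≤ (t : Int)) := by
  cases hc : pvFitsCount vals.length vals (List.replicate (vals.length + 1) 0) with
  | none =>
      rw [show pvFits vals = false from by simp only [pvFits]; rw [hc]]
      constructor
      · intro h; cases h
      · rintro ⟨hpos, -⟩
        have := (pvFitsCount_some_iff vals.length vals (List.replicate (vals.length + 1) 0)).mpr hpos
        rw [hc] at this; cases this
  | some cnt =>
      rw [show pvFits vals = pvFitsSweep cnt (List.range' 1 vals.length) 0 from by
        simp only [pvFits]; rw [hc]]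
      have hpos : ∀ v ∈ vals, 1 ≤ v := by
        have := (pvFitsCount_some_iff vals.length vals (List.replicate (vals.length + 1) 0)).mp
        rw [hc] at this; exact this rfl
      have hpsum : ∀ t : Nat, t ≤ vals.length →
          pvPsum cnt t = (vals.countP (fun v => decide (v ≤ (t : Int))) : Int) := by
        intro t ht
        rw [pvFitsCount_psum vals.length vals (List.replicate (vals.length + 1) 0) cnt
          (by simp) hc t ht, pvPsum_replicate]
        ring
      have h0 : pvFitsSweep cnt (List.range' 1 vals.length) 0
          = pvFitsSweep cnt (List.range' 1 vals.length) (pvPsum cnt (1 - 1)) := rfl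
      rw [h0, pvFitsSweep_iff cnt vals.length 1 (le_refl 1)]
      constructor
      · intro h
        refine ⟨hpos, fun t ht1 ht2 => ?_⟩
        rw [← hpsum t ht2]
        exact h t ht1 (by omega)
      · rintro ⟨-, h⟩ t ht1 ht2
        rw [hpsum t (by omega)]
        exact h t ht1 (by omega)

theorem pv_sublist_getElem (l s : List Int) (h : l.Sublist s) :
    ∀ j (hj : j < l.length), ∃ i, j ≤ i ∧ ∃ hi : i < s.length, l[j] = s[i] := by
  induction h with
  | slnil => intro j hj; simp at hj
  | cons a h ih =>
      intro j hj
      obtain ⟨i, hji, hi, heq⟩ := ih j hj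
      exact ⟨i + 1, by omega, by simpa using hi, by simpa using heq⟩
  | cons₂ a h ih =>
      intro j hj
      cases j with
      | zero => exact ⟨0, le_refl 0, by simp, by simp⟩
      | succ j =>
          obtain ⟨i, hji, hi, heq⟩ := ih j (by simpa using hj)
          exact ⟨i + 1, by omega, by simpa using hi, by simpa using heq⟩

-- Key bridge: on an ascending list, "j-th element ≥ j+1 for all j" ⇔ the count condition.
theorem pvBridge (s : List Int) (hs : s.Pairwise (· ≤ ·)) :
    (∀ j (hj : j < s.length), (j : Int) + 1 ≤ s[j]) ↔
      ((∀ v ∈ s, 1 ≤ v) ∧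
        ∀ t : Nat, 1 ≤ t → t ≤ s.length → (s.countP (fun v => decide (v ≤ (t : Int))) : Int) ≤ (t : Int)) := by
  have hmono : ∀ a b (ha : a < s.length) (hb : b < s.length), a ≤ b → s[a] ≤ s[b] := by
    intro a b ha hb hab
    rcases Nat.eq_or_lt_of_le hab with h | h
    · subst h; exact le_refl _
    · exact List.pairwise_iff_getElem.mp hs a b ha hb h
  constructor
  · intro h
    constructor
    · intro v hv
      obtain ⟨j, hj, heq⟩ := List.getElem_of_mem hv
      have := h j hj
      omega
    · intro t ht1 ht2
      by_contra hcon
      push Not at hcon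
      set p : Int → Bool := fun v => decide (v ≤ (t : Int)) with hp
      have hlt : t < (s.filter p).length := by
        rw [← List.countP_eq_length_filter]; omega
      obtain ⟨i, hti, hi, heq⟩ := pv_sublist_getElem (s.filter p) s List.filter_sublist t hlt
      have hmem : (s.filter p)[t] ∈ s.filter p := List.getElem_mem hlt
      have hpe : p ((s.filter p)[t]) = true := List.of_mem_filter hmem
      rw [heq] at hpe
      have h1 : s[i] ≤ (t : Int) := by simpa [hp] using hpe
      have h2 := h i hi
      omega
  · rintro ⟨hpos, hcnt⟩ j hj
    by_contra hcon
    push Not at hcon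
    have hj1 : 1 ≤ s[j] := hpos s[j] (List.getElem_mem hj)
    set t : Nat := s[j].toNat with htdef
    have htj : (t : Int) = s[j] := by omega
    have ht1 : 1 ≤ t := by omega
    have ht2 : t ≤ s.length := by omega
    set p : Int → Bool := fun v => decide (v ≤ (t : Int)) with hp
    have htake : (s.take (j + 1)).countP p = (s.take (j + 1)).length := by
      rw [List.countP_eq_length]
      intro a ha
      obtain ⟨idx, hidx, heq⟩ := List.getElem_of_mem ha
      have hidx' : idx < s.length := by
        have : (s.take (j + 1)).length = min (j + 1) s.length := List.length_take
        omega
      have hidxj : idx ≤ j := by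
        have : (s.take (j + 1)).length = min (j + 1) s.length := List.length_take
        omega
      have h1 : (s.take (j + 1))[idx] = s[idx] := List.getElem_take
      have hle : a ≤ s[j] := by
        rw [← heq, h1]; exact hmono idx j hidx' hj hidxj
      simp only [hp, decide_eq_true_eq]
      omega
    have hlen_take : (s.take (j + 1)).length = j + 1 := by
      have : (s.take (j + 1)).length = min (j + 1) s.length := List.length_take
      omega
    have hsplit : s.countP p = (s.take (j + 1)).countP p + (s.drop (j + 1)).countP p := by
      conv_lhs => rw [← List.take_append_drop (j + 1) s]
      exact List.countP_append
    have hge : j + 1 ≤ s.countP p := by omega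
    have hc2 := hcnt t ht1 ht2
    rw [← hp] at hc2
    omega

theorem pvFits_eq_of_perm (s vals : List Int) (hs : s.Pairwise (· ≤ ·)) (hp : s.Perm vals) :
    pvFits vals = true ↔ ∀ j (hj : j < s.length), (j : Int) + 1 ≤ s[j] := by
  rw [pvFits_iff, pvBridge s hs]
  have hlen := hp.length_eq
  constructor
  · rintro ⟨h1, h2⟩
    refine ⟨fun v hv => h1 v (hp.mem_iff.mp hv), fun t ht1 ht2 => ?_⟩
    rw [hp.countP_eq]
    exact h2 t ht1 (by omega)
  · rintro ⟨h1, h2⟩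
    refine ⟨fun v hv => h1 v (hp.mem_iff.mpr hv), fun t ht1 ht2 => ?_⟩
    rw [← hp.countP_eq]
    exact h2 t ht1 (by omega)

theorem pvBluesLoop_rev (l : List Int) : ∀ (i : Int),
    pvBluesLoop l.reverse i l.length = true ↔ ∀ j (hj : j < l.length), i + (j : Int) ≤ l[j] := by
  induction l with
  | nil => intro i; simp [pvBluesLoop]
  | cons x xs ih =>
      intro i
      simp only [List.reverse_cons, List.length_cons]
      simp only [pvBluesLoop, PySem.List.pop?_last]
      by_cases hx : x < i
      · rw [if_pos hx]
        constructor
        · intro h; cases h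
        · intro h
          have := h 0 (by omega)
          simp only [List.getElem_cons_zero] at this
          omega
      · rw [if_neg hx]
        rw [ih (i + 1)]
        constructor
        · intro h j hj
          cases j with
          | zero => simp only [List.getElem_cons_zero]; omega
          | succ j =>
              have := h j (by omega)
              simp only [List.getElem_cons_succ]
              push_cast at this ⊢
              omega
        · intro h j hj
          have := h (j + 1) (by omega)
          simp only [List.getElem_cons_succ] at this
          push_cast at this ⊢
          omega

theorem pvRedsLoop_rev (l : List Int) : ∀ (i : Int),
    pvRedsLoop l.reverse i l.length = true ↔ ∀ j (hj : j < l.length), l[j] ≤ i + (j : Int) := by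
  induction l with
  | nil => intro i; simp [pvRedsLoop]
  | cons x xs ih =>
      intro i
      simp only [List.reverse_cons, List.length_cons]
      simp only [pvRedsLoop, PySem.List.pop?_last]
      by_cases hx : x > i
      · rw [if_pos hx]
        constructor
        · intro h; cases h
        · intro h
          have := h 0 (by omega)
          simp only [List.getElem_cons_zero] at this
          omega
      · rw [if_neg hx]
        rw [ih (i + 1)]
        constructor
        · intro h j hj
          cases j with
          | zero => simp only [List.getElem_cons_zero]; omega
          | succ j =>
              have := h j (by omega)
              simp only [List.getElem_cons_succ]
              push_cast at this ⊢
              omega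
        · intro h j hj
          have := h (j + 1) (by omega)
          simp only [List.getElem_cons_succ] at this
          push_cast at this ⊢
          omega

theorem pvPartLoop_eq (l : List (Int × String)) : ∀ (bl rd : List Int),
    pvPartLoop l bl rd =
      (bl ++ (l.filter (fun p => p.2 == "B")).map (fun p => p.1),
       rd ++ (l.filter (fun p => !(p.2 == "B"))).map (fun p => p.1)) := by
  induction l with
  | nil => intro bl rd; simp [pvPartLoop]
  | cons p rest ih =>
      intro bl rd
      obtain ⟨num, color⟩ := p
      cases hb : (color == "B") with
      | false => simp [pvPartLoop, hb, ih]
      | true => simp [pvPartLoop, hb, ih]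

theorem pvBlues_eq (B : List Int) :
    pvBluesLoop (PySem.List.sorted B (fun x => x) true) 1
      (PySem.List.sorted B (fun x => x) true).length = pvFits B := by
  set bs := PySem.List.sorted B (fun x => x) true with hbs
  rw [Bool.eq_iff_iff]
  have hpair : bs.reverse.Pairwise (· ≤ ·) := by
    rw [List.pairwise_reverse]
    exact PySem.List.sorted_pairwise_rev B (fun x => x)
  have hperm : bs.reverse.Perm B := (bs.reverse_perm).trans (PySem.List.sorted_perm B _ true)
  rw [pvFits_eq_of_perm bs.reverse B hpair hperm]
  have h1 : pvBluesLoop bs 1 bs.length = pvBluesLoop (bs.reverse).reverse 1 (bs.reverse).length := by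
    rw [List.reverse_reverse, List.length_reverse]
  rw [h1, pvBluesLoop_rev]
  constructor <;> intro h j hj <;> have := h j hj <;> omega

theorem pvReds_eq (R : List Int) (n temp : Nat) (hn : n = temp + R.length) :
    pvRedsLoop (PySem.List.sorted R (fun x => x) true) ((temp : Int) + 1) (n - temp)
      = pvFits (R.map (fun v => (n : Int) + 1 - v)) := by
  set rs := PySem.List.sorted R (fun x => x) true with hrs
  have hlenrs : rs.length = R.length := PySem.List.length_sorted R _ true
  set f : Int → Int := fun v => (n : Int) + 1 - v with hf
  have hpair' : (rs.map f).Pairwise (· ≤ ·) := by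
    rw [List.pairwise_map]
    exact (PySem.List.sorted_pairwise_rev R (fun x => x)).imp (fun hab => by simp [hf]; omega)
  have hperm' : (rs.map f).Perm (R.map f) := (PySem.List.sorted_perm R _ true).map f
  rw [Bool.eq_iff_iff, pvFits_eq_of_perm (rs.map f) (R.map f) hpair' hperm']
  have h1 : pvRedsLoop rs ((temp : Int) + 1) (n - temp)
      = pvRedsLoop (rs.reverse).reverse ((temp : Int) + 1) (rs.reverse).length := by
    rw [List.reverse_reverse, List.length_reverse, hlenrs]
    congr 1
    omega
  rw [h1, pvRedsLoop_rev]
  constructor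
  · intro h k hk
    have hk' : k < rs.length := by simpa using hk
    have hi : rs.length - 1 - k < rs.length := by omega
    have hgoal : (rs.map f)[k] = f rs[k] := List.getElem_map f
    have hrev : rs.reverse[rs.length - 1 - k]'(by simp; omega) = rs[k] := by
      rw [List.getElem_reverse]
      congr 1
      omega
    have h2 := h (rs.length - 1 - k) (by simp; omega)
    rw [hrev] at h2
    rw [hgoal]
    simp only [hf]
    omega
  · intro h j hj
    have hj' : j < rs.length := by simpa using hj
    have h2 := h (rs.length - 1 - j) (by simp; omega)
    have hm : (rs.map f)[rs.length - 1 - j]'(by simp; omega) = f (rs[rs.length - 1 - j]'(by omega)) :=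
      List.getElem_map f
    rw [hm] at h2
    have hrev : rs.reverse[j]'(by simp; omega) = rs[rs.length - 1 - j]'(by omega) := by
      rw [List.getElem_reverse]
    rw [hrev]
    simp only [hf] at h2
    omega

-- ===== VERDICT (by name: the statement is the Claim_ definition above) =====
theorem cf_753D_spec : Claim_equal_cf_753D := by
  intro numbers colors _ hpre
  unfold Pre_cf_753D at hpre
  unfold Spec_cf_753D
  have hzlen : (numbers.zip colors).length = numbers.length := by
    rw [List.length_zip]; omega
  simp only [cf_753D, cf_753D_alt, pvPartLoop_eq, List.nil_append]
  set pairs := numbers.zip colors with hpairs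
  set B := (pairs.filter (fun p => p.2 == "B")).map (fun p => p.1) with hB
  set R := (pairs.filter (fun p => !(p.2 == "B"))).map (fun p => p.1) with hR
  have hsplit : numbers.length = B.length + R.length := by
    rw [hB, hR]
    simp only [List.length_map]
    rw [← hzlen]
    exact List.length_eq_length_filter_add _
  rw [pvBlues_eq B, pvReds_eq R numbers.length B.length hsplit]
  have hmm : R.map (fun v => (numbers.length : Int) + 1 - v)
      = (pairs.filter (fun p => !(p.2 == "B"))).map (fun p => (numbers.length : Int) + 1 - p.1) := by
    rw [hR, List.map_map]
    rfl
  rw [hmm]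
  cases pvFits B <;> simp
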